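-- pv_equiv track=rewrite | github.com/RodBC/Character-Histogram- | minDel.py | find_min_deletions
-- ===== SOURCE A (Python) =====
-- def find_min_deletions(histogram1, histogram2):
--     min_deletions = 0
--     all_chars = set(histogram1.keys()).union(histogram2.keys())
--
--     for char in all_chars:
--         count1 = histogram1.get(char, 0)
--         count2 = histogram2.get(char, 0)
--         min_deletions += abs(count1 - count2)
--
--     return f"there has to be at least ---> {min_deletions} character deletion to make them equal"
-- ===== SOURCE B (Python) =====
-- def find_min_deletions(histogram1, histogram2):
--     a = sorted(histogram1.items(), key=lambda p: p[0])
--     b = sorted(histogram2.items(), key=lambda p: p[0])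
--     i = 0
--     j = 0
--     total = 0
--     while i < len(a) and j < len(b):
--         k1, v1 = a[i]
--         k2, v2 = b[j]
--         if k1 == k2:
--             total += abs(v1 - v2)
--             i += 1
--             j += 1
--         elif k1 < k2:
--             total += abs(v1)
--             i += 1
--         else:
--             total += abs(v2)
--             j += 1
--     while i < len(a):
--         total += abs(a[i][1])
--         i += 1
--     while j < len(b):
--         total += abs(b[j][1])
--         j += 1
--     return f"there has to be at least ---> {total} character deletion to make them equal"
-- ===== Notes on version B (the rewrite author's own statement) =====
-- stated objective: alternative
-- what changed: B replaces A's hash-based key-union set with two dict lookups per key by sorting both item lists by key and doing a two-pointer merge that sums |v1-v2| on matching keys and |v| on unmatched heads, with no set and no dictionary lookups at all. Pre_ only excludes association lists with duplicate keys, which cannot arise from Python dict arguments.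
import Mathlib
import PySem

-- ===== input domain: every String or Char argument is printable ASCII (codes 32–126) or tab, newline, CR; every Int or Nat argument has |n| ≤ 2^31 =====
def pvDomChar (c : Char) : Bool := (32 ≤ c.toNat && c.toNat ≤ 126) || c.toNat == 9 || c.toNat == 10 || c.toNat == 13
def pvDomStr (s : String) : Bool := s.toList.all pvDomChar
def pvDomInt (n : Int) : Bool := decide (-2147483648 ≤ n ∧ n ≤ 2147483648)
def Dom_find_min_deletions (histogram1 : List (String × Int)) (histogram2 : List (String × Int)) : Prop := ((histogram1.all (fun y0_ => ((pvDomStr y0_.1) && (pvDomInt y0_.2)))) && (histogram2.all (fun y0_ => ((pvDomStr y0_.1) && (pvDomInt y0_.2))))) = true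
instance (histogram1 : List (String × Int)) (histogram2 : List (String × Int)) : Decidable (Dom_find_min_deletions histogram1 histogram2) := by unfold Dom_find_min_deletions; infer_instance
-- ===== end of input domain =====

-- B sorts both item lists by key and sums deletions in a single two-pointer merge,
-- instead of A's hash-set key union with two dict lookups per key (objective: alternative).

-- ===== PORT A =====
def find_min_deletions (histogram1 : List (String × Int)) (histogram2 : List (String × Int)) : String :=
  -- min_deletions = 0
  let min_deletions : Int := 0
  -- all_chars = set(histogram1.keys()).union(histogram2.keys())
  let all_chars : PySem.Set String :=
    PySem.Set.union (PySem.Set.ofList (PySem.Dict.keys (PySem.Dict.mk histogram1)))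
      (PySem.Dict.keys (PySem.Dict.mk histogram2))
  -- for char in all_chars: min_deletions += abs(count1 - count2)
  -- (Python iterates the set in hash order; the sum does not depend on the order)
  let min_deletions : Int :=
    all_chars.foldl
      (fun acc char =>
        let count1 := PySem.Dict.getD (PySem.Dict.mk histogram1) char 0
        let count2 := PySem.Dict.getD (PySem.Dict.mk histogram2) char 0
        acc + |count1 - count2|) min_deletions
  "there has to be at least ---> " ++ PySem.Int.toStr min_deletions ++ " character deletion to make them equal"

-- ===== PORT B =====
-- the two-pointer merge loops of Source B: the main `while i < len(a) and j < len(b)` loop,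
-- then the two leftover loops (exactly one of the lists is non-empty when the main loop ends)
def pvMergeAux : List (String × Int) → List (String × Int) → Int → Int
  | [], ys, total => ys.foldl (fun t p => t + |p.2|) total
  | x :: xs, [], total => (x :: xs).foldl (fun t p => t + |p.2|) total
  | (k1, v1) :: xs, (k2, v2) :: ys, total =>
      if k1 = k2 then pvMergeAux xs ys (total + |v1 - v2|)
      else if k1 < k2 then pvMergeAux xs ((k2, v2) :: ys) (total + |v1|)
      else pvMergeAux ((k1, v1) :: xs) ys (total + |v2|)
termination_by xs ys _ => xs.length + ys.length

def find_min_deletions_alt (histogram1 : List (String × Int)) (histogram2 : List (String × Int)) : String :=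
  -- a = sorted(histogram1.items(), key=lambda p: p[0]); b likewise
  let a := PySem.List.sorted histogram1 (fun p => p.1) false
  let b := PySem.List.sorted histogram2 (fun p => p.1) false
  -- i = j = 0; total = 0; while loops (pvMergeAux)
  let total := pvMergeAux a b 0
  "there has to be at least ---> " ++ PySem.Int.toStr total ++ " character deletion to make them equal"

-- ===== PRECONDITION & SPEC =====
-- Pre_ excludes association lists with duplicate keys: a Python dict argument always has
-- distinct keys, so such lists do not represent any input the Python function can receive.
def Pre_find_min_deletions (histogram1 : List (String × Int)) (histogram2 : List (String × Int)) : Prop :=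
  (histogram1.map Prod.fst).Nodup ∧ (histogram2.map Prod.fst).Nodup
instance (histogram1 : List (String × Int)) (histogram2 : List (String × Int)) : Decidable (Pre_find_min_deletions histogram1 histogram2) := by unfold Pre_find_min_deletions; infer_instance

def pvWitness_find_min_deletions : (List (String × Int)) × (List (String × Int)) :=
  ([("a", 2), ("b", 1)], [("b", 3), ("c", -1)])

def Spec_find_min_deletions (histogram1 : List (String × Int)) (histogram2 : List (String × Int)) (out : String) : Prop := out = find_min_deletions_alt histogram1 histogram2
instance (histogram1 : List (String × Int)) (histogram2 : List (String × Int)) (out : String) : Decidable (Spec_find_min_deletions histogram1 histogram2 out) := by unfold Spec_find_min_deletions; infer_instance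

-- ===== CLAIM (what is proved, stated in full; the proofs are below) =====
def Claim_equal_find_min_deletions : Prop := ∀ (histogram1 : List (String × Int)) (histogram2 : List (String × Int)), Dom_find_min_deletions histogram1 histogram2 → Pre_find_min_deletions histogram1 histogram2 → Spec_find_min_deletions histogram1 histogram2 (find_min_deletions histogram1 histogram2)

-- ===== LEMMAS AND PROOFS =====

-- lookup with default 0, the value both sides sum over
def pvLk (l : List (String × Int)) (c : String) : Int := (PySem.Dict.mk l).getD c 0

theorem pvLk_nil (c : String) : pvLk [] c = 0 := rfl

theorem pvLk_cons (p : String × Int) (l : List (String × Int)) (c : String) :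
    pvLk (p :: l) c = if p.1 = c then p.2 else pvLk l c := by
  obtain ⟨k, v⟩ := p
  simp only [pvLk, PySem.Dict.getD_eq_get?_getD, PySem.Dict.get?_mk_cons]
  by_cases h : k = c <;> simp [h, Ne.symm]

theorem pvLk_of_not_mem (l : List (String × Int)) (c : String) (h : c ∉ l.map Prod.fst) :
    pvLk l c = 0 := by
  induction l with
  | nil => rfl
  | cons p t ih =>
    simp only [List.map_cons, List.mem_cons, not_or] at h
    rw [pvLk_cons]
    simp [Ne.symm h.1, ih h.2]

-- lookup is invariant under permutation when keys are distinct
theorem pvLk_perm (l l' : List (String × Int)) (hp : l.Perm l')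
    (hnd : (l.map Prod.fst).Nodup) (c : String) : pvLk l c = pvLk l' c := by
  by_cases hc : c ∈ l.map Prod.fst
  · obtain ⟨p, hpmem, hpc⟩ := List.exists_of_mem_map hc
    have hnd' : (l'.map Prod.fst).Nodup := (hp.map Prod.fst).nodup_iff.mp hnd
    have h1 : (PySem.Dict.mk l).getD c 0 = p.2 := by
      have := PySem.Dict.getD_of_mem_items (d := PySem.Dict.mk l) (k := p.1) (v := p.2)
        (by simpa using hpmem) (by simpa using hnd) (d0 := 0)
      simpa [hpc] using this
    have h2 : (PySem.Dict.mk l').getD c 0 = p.2 := by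
      have := PySem.Dict.getD_of_mem_items (d := PySem.Dict.mk l') (k := p.1) (v := p.2)
        (by simpa using hp.mem_iff.mp hpmem) (by simpa using hnd') (d0 := 0)
      simpa [hpc] using this
    simp [pvLk, h1, h2]
  · rw [pvLk_of_not_mem _ _ hc, pvLk_of_not_mem]
    intro hmem
    exact hc ((hp.map Prod.fst).mem_iff.mpr hmem)

-- the key set both sides sum over
def pvK (xs ys : List (String × Int)) : Finset String :=
  (xs.map Prod.fst).toFinset ∪ (ys.map Prod.fst).toFinset

-- a key smaller than every key of l is not among l's keys
theorem not_mem_keys_of_forall_lt (k : String) (l : List (String × Int))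
    (h : ∀ q ∈ l, k < q.1) : k ∉ l.map Prod.fst := by
  simp only [List.mem_map]
  rintro ⟨q, hq, rfl⟩
  exact lt_irrefl _ (h q hq)

-- strictly increasing keys are distinct
theorem keys_nodup_of_pairwise (l : List (String × Int))
    (h : l.Pairwise (fun p q => p.1 < q.1)) : (l.map Prod.fst).Nodup :=
  List.pairwise_map.mpr (h.imp ne_of_lt)

-- in a duplicate-free association list every stored pair is what lookup returns
theorem pvLk_self (l : List (String × Int)) (hnd : (l.map Prod.fst).Nodup)
    (p : String × Int) (hp : p ∈ l) : pvLk l p.1 = p.2 := by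
  have := PySem.Dict.getD_of_mem_items (d := PySem.Dict.mk l) (k := p.1) (v := p.2)
    (by simpa using hp) (by simpa using hnd) (d0 := 0)
  simpa [pvLk] using this

-- a leftover tail sums |value| over its own keys
theorem foldl_abs_eq_sum (l : List (String × Int))
    (h : l.Pairwise (fun p q => p.1 < q.1)) (t : Int) :
    l.foldl (fun t p => t + |p.2|) t = t + ∑ c ∈ (l.map Prod.fst).toFinset, |pvLk l c| := by
  have hnd : (l.map Prod.fst).Nodup := keys_nodup_of_pairwise l h
  have := PySem.List.foldl_add (l := l) (g := fun p : String × Int => |p.2|) (a := t)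
  rw [this, List.sum_toFinset _ hnd, List.map_map]
  have hmap : l.map ((fun c => |pvLk l c|) ∘ Prod.fst) = l.map (fun p => |p.2|) :=
    List.map_congr_left (fun p hp => by simp [Function.comp, pvLk_self l hnd p hp])
  rw [hmap]

-- core lemma: the merge loop computes the Finset sum of per-key absolute differences
theorem mergeAux_eq_sum : ∀ (n : Nat) (xs ys : List (String × Int)),
    xs.length + ys.length ≤ n →
    xs.Pairwise (fun p q => p.1 < q.1) → ys.Pairwise (fun p q => p.1 < q.1) →
    ∀ t : Int, pvMergeAux xs ys t = t + ∑ c ∈ pvK xs ys, |pvLk xs c - pvLk ys c| := by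
  intro n
  induction n with
  | zero =>
    intro xs ys hlen hx hy t
    have hxs : xs = [] := by cases xs <;> simp_all
    have hys : ys = [] := by cases ys <;> simp_all
    subst hxs; subst hys
    simp [pvMergeAux, pvK]
  | succ n ih =>
    intro xs ys hlen hx hy t
    match xs, ys with
    | [], ys =>
      simp only [pvMergeAux]
      rw [foldl_abs_eq_sum ys hy t]
      simp [pvK, pvLk_nil]
    | x :: xs, [] =>
      simp only [pvMergeAux]
      rw [foldl_abs_eq_sum (x :: xs) hx t]
      simp [pvK, pvLk_nil]
    | (k1, v1) :: xs, (k2, v2) :: ys =>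
      rw [List.pairwise_cons] at hx hy
      have hxnd := keys_nodup_of_pairwise xs hx.2
      have hynd := keys_nodup_of_pairwise ys hy.2
      simp only [List.length_cons] at hlen
      by_cases h12 : k1 = k2
      · -- equal heads: both advance
        subst h12
        have hk1x : k1 ∉ xs.map Prod.fst := not_mem_keys_of_forall_lt k1 xs (fun q hq => hx.1 q hq)
        have hk1y : k1 ∉ ys.map Prod.fst := not_mem_keys_of_forall_lt k1 ys (fun q hq => hy.1 q hq)
        have hnotin : k1 ∉ pvK xs ys := by simp [pvK, hk1x, hk1y]
        rw [show pvMergeAux ((k1, v1) :: xs) ((k1, v2) :: ys) t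
              = pvMergeAux xs ys (t + |v1 - v2|) by simp [pvMergeAux]]
        rw [ih xs ys (by omega) hx.2 hy.2]
        have hK : pvK ((k1, v1) :: xs) ((k1, v2) :: ys) = insert k1 (pvK xs ys) := by
          simp [pvK, Finset.insert_union, Finset.union_insert]
        have hsum : ∑ c ∈ pvK xs ys, |pvLk ((k1, v1) :: xs) c - pvLk ((k1, v2) :: ys) c|
            = ∑ c ∈ pvK xs ys, |pvLk xs c - pvLk ys c| := by
          refine Finset.sum_congr rfl (fun c hc => ?_)
          have hne : k1 ≠ c := fun he => hnotin (he ▸ hc)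
          rw [pvLk_cons (k1, v1), pvLk_cons (k1, v2), if_neg hne, if_neg hne]
        rw [hK, Finset.sum_insert hnotin, hsum,
          pvLk_cons (k1, v1), pvLk_cons (k1, v2), if_pos rfl, if_pos rfl]
        ring
      · by_cases hlt : k1 < k2
        · -- left head smaller: advance left
          have hk1x : k1 ∉ xs.map Prod.fst := not_mem_keys_of_forall_lt k1 xs (fun q hq => hx.1 q hq)
          have hk1y : k1 ∉ ((k2, v2) :: ys).map Prod.fst := by
            apply not_mem_keys_of_forall_lt
            intro q hq
            rcases List.mem_cons.mp hq with rfl | hq'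
            · exact hlt
            · exact lt_trans hlt (hy.1 q hq')
          have hnotin : k1 ∉ pvK xs ((k2, v2) :: ys) := by
            simp only [pvK, Finset.mem_union, List.mem_toFinset]
            push Not
            exact ⟨hk1x, by simpa using hk1y⟩
          rw [show pvMergeAux ((k1, v1) :: xs) ((k2, v2) :: ys) t
                = pvMergeAux xs ((k2, v2) :: ys) (t + |v1|) by
              simp [pvMergeAux, h12, hlt]]
          rw [ih xs ((k2, v2) :: ys) (by simp only [List.length_cons]; omega) hx.2
            (List.pairwise_cons.mpr hy)]
          have hK : pvK ((k1, v1) :: xs) ((k2, v2) :: ys) = insert k1 (pvK xs ((k2, v2) :: ys)) := by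
            ext c; simp [pvK]; try tauto
          have hsum : ∑ c ∈ pvK xs ((k2, v2) :: ys), |pvLk ((k1, v1) :: xs) c - pvLk ((k2, v2) :: ys) c|
              = ∑ c ∈ pvK xs ((k2, v2) :: ys), |pvLk xs c - pvLk ((k2, v2) :: ys) c| := by
            refine Finset.sum_congr rfl (fun c hc => ?_)
            have hne : k1 ≠ c := fun he => hnotin (he ▸ hc)
            rw [pvLk_cons (k1, v1), if_neg hne]
          rw [hK, Finset.sum_insert hnotin, hsum,
            pvLk_cons (k1, v1), if_pos rfl, pvLk_of_not_mem _ _ hk1y]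
          simp only [sub_zero]
          ring
        · -- right head smaller: advance right
          have hgt : k2 < k1 := lt_of_le_of_ne (not_lt.mp hlt) (Ne.symm h12)
          have hk2y : k2 ∉ ys.map Prod.fst := not_mem_keys_of_forall_lt k2 ys (fun q hq => hy.1 q hq)
          have hk2x : k2 ∉ ((k1, v1) :: xs).map Prod.fst := by
            apply not_mem_keys_of_forall_lt
            intro q hq
            rcases List.mem_cons.mp hq with rfl | hq'
            · exact hgt
            · exact lt_trans hgt (hx.1 q hq')
          have hnotin : k2 ∉ pvK ((k1, v1) :: xs) ys := by
            simp only [pvK, Finset.mem_union, List.mem_toFinset]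
            push Not
            exact ⟨by simpa using hk2x, hk2y⟩
          rw [show pvMergeAux ((k1, v1) :: xs) ((k2, v2) :: ys) t
                = pvMergeAux ((k1, v1) :: xs) ys (t + |v2|) by
              simp [pvMergeAux, h12, hlt]]
          rw [ih ((k1, v1) :: xs) ys (by simp only [List.length_cons]; omega)
            (List.pairwise_cons.mpr hx) hy.2]
          have hK : pvK ((k1, v1) :: xs) ((k2, v2) :: ys) = insert k2 (pvK ((k1, v1) :: xs) ys) := by
            ext c; simp [pvK]; try tauto
          have hsum : ∑ c ∈ pvK ((k1, v1) :: xs) ys, |pvLk ((k1, v1) :: xs) c - pvLk ((k2, v2) :: ys) c|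
              = ∑ c ∈ pvK ((k1, v1) :: xs) ys, |pvLk ((k1, v1) :: xs) c - pvLk ys c| := by
            refine Finset.sum_congr rfl (fun c hc => ?_)
            have hne : k2 ≠ c := fun he => hnotin (he ▸ hc)
            rw [pvLk_cons (k2, v2), if_neg hne]
          rw [hK, Finset.sum_insert hnotin, hsum,
            pvLk_cons (k2, v2), if_pos rfl, pvLk_of_not_mem _ _ hk2x]
          simp only [zero_sub, abs_neg]
          ring

-- A's set-union fold is the same Finset sum
theorem A_eq_sum (h1 h2 : List (String × Int)) :
    find_min_deletions h1 h2 = "there has to be at least ---> "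
      ++ PySem.Int.toStr (∑ c ∈ pvK h1 h2, |pvLk h1 c - pvLk h2 c|)
      ++ " character deletion to make them equal" := by
  unfold find_min_deletions
  have hndU : (PySem.Set.union (PySem.Set.ofList ((PySem.Dict.mk h1).keys))
      ((PySem.Dict.mk h2).keys)).Nodup :=
    PySem.Set.nodup_union _ _ (PySem.Set.nodup_ofList _)
  have hU : (PySem.Set.union (PySem.Set.ofList ((PySem.Dict.mk h1).keys))
      ((PySem.Dict.mk h2).keys)).toFinset = pvK h1 h2 := by
    ext c
    simp [PySem.Set.mem_union, PySem.Set.mem_ofList, pvK]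
  have hfold := PySem.List.foldl_add
    (l := PySem.Set.union (PySem.Set.ofList ((PySem.Dict.mk h1).keys)) ((PySem.Dict.mk h2).keys))
    (g := fun char => |PySem.Dict.getD (PySem.Dict.mk h1) char 0 - PySem.Dict.getD (PySem.Dict.mk h2) char 0|)
    (a := 0)
  simp only [hfold, zero_add]
  rw [← List.sum_toFinset _ hndU, hU]
  rfl

-- ===== VERDICT (by name: the statement is the Claim_ definition above) =====
theorem find_min_deletions_spec : Claim_equal_find_min_deletions := by
  intro h1 h2 _ hpre
  obtain ⟨hn1, hn2⟩ := hpre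
  unfold Spec_find_min_deletions find_min_deletions_alt
  rw [A_eq_sum]
  have hperm1 : (PySem.List.sorted h1 (fun p => p.1) false).Perm h1 := PySem.List.sorted_perm h1 (fun p => p.1) false
  have hperm2 : (PySem.List.sorted h2 (fun p => p.1) false).Perm h2 := PySem.List.sorted_perm h2 (fun p => p.1) false
  have hnd1' : ((PySem.List.sorted h1 (fun p => p.1) false).map Prod.fst).Nodup :=
    ((hperm1.map Prod.fst).nodup_iff).mpr hn1
  have hnd2' : ((PySem.List.sorted h2 (fun p => p.1) false).map Prod.fst).Nodup :=
    ((hperm2.map Prod.fst).nodup_iff).mpr hn2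
  have hlt1 : (PySem.List.sorted h1 (fun p => p.1) false).Pairwise (fun p q => p.1 < q.1) :=
    ((PySem.List.sorted_pairwise h1 (fun p => p.1)).and (List.pairwise_map.mp hnd1')).imp
      (fun h => lt_of_le_of_ne h.1 h.2)
  have hlt2 : (PySem.List.sorted h2 (fun p => p.1) false).Pairwise (fun p q => p.1 < q.1) :=
    ((PySem.List.sorted_pairwise h2 (fun p => p.1)).and (List.pairwise_map.mp hnd2')).imp
      (fun h => lt_of_le_of_ne h.1 h.2)
  have hB := mergeAux_eq_sum
    ((PySem.List.sorted h1 (fun p => p.1) false).length + (PySem.List.sorted h2 (fun p => p.1) false).length)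
    (PySem.List.sorted h1 (fun p => p.1) false) (PySem.List.sorted h2 (fun p => p.1) false)
    le_rfl hlt1 hlt2 0
  simp only [hB, zero_add]
  have hKeq : pvK (PySem.List.sorted h1 (fun p => p.1) false) (PySem.List.sorted h2 (fun p => p.1) false)
      = pvK h1 h2 := by
    have htf : ∀ {l l' : List String}, l.Perm l' → l.toFinset = l'.toFinset := by
      intro l l' hp
      ext x
      simp [List.mem_toFinset, hp.mem_iff]
    unfold pvK
    rw [htf (hperm1.map Prod.fst), htf (hperm2.map Prod.fst)]
  have hsum : ∑ c ∈ pvK (PySem.List.sorted h1 (fun p => p.1) false) (PySem.List.sorted h2 (fun p => p.1) false),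
        |pvLk (PySem.List.sorted h1 (fun p => p.1) false) c - pvLk (PySem.List.sorted h2 (fun p => p.1) false) c|
      = ∑ c ∈ pvK h1 h2, |pvLk h1 c - pvLk h2 c| := by
    rw [hKeq]
    refine Finset.sum_congr rfl (fun c _ => ?_)
    rw [pvLk_perm _ _ hperm1 hnd1' c, pvLk_perm _ _ hperm2 hnd2' c]
  rw [hsum]
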